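-- pv_equiv track=rewrite | github.com/Killersmod/Visual-Python | src/visualpython/nodes/models/string_replace_node.py | _case_insensitive_replace
-- ===== SOURCE A (Python) =====
-- def _case_insensitive_replace(
--     text: str, search: str, replacement: str, max_count: int = -1
-- ) -> str:
--     """
--     Perform case-insensitive string replacement.
--
--     Args:
--         text: The source text.
--         search: The string to search for.
--         replacement: The replacement string.
--         max_count: Maximum number of replacements (-1 for unlimited).
--
--     Returns:
--         The text with replacements made.
--     """
--     if not search:
--         return text
--
--     result = []
--     text_lower = text.lower()
--     search_lower = search.lower()
--
--     pos = 0
--     count = 0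
--
--     while True:
--         # Find next occurrence
--         idx = text_lower.find(search_lower, pos)
--         if idx == -1:
--             # No more occurrences
--             result.append(text[pos:])
--             break
--
--         # Add text before match and the replacement
--         result.append(text[pos:idx])
--         result.append(replacement)
--
--         # Move position past the match
--         pos = idx + len(search)
--         count += 1
--
--         # Check if we've reached max replacements
--         if max_count > 0 and count >= max_count:
--             result.append(text[pos:])
--             break
--
--     return "".join(result)
-- ===== SOURCE B (Python) =====
-- def _case_insensitive_replace(
--     text: str, search: str, replacement: str, max_count: int = -1
-- ) -> str:
--     """Case-insensitive replace via a single left-to-right character scan."""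
--     if not search:
--         return text
--
--     text_lower = text.lower()
--     search_lower = search.lower()
--     n = len(search)
--     out = []
--     i = 0
--     remaining = max_count if max_count > 0 else -1  # -1 means unlimited
--
--     while i < len(text):
--         if remaining != 0 and text_lower.startswith(search_lower, i):
--             out.append(replacement)
--             i += n
--             if remaining > 0:
--                 remaining -= 1
--         else:
--             out.append(text[i])
--             i += 1
--
--     return "".join(out)
-- ===== Notes on version B (the rewrite author's own statement) =====
-- stated objective: alternative
-- what changed: Replaces A's repeated str.find-on-the-lowered-text loop with index slicing by a single left-to-right character scan that tests startswith(search_lower, i) on the lowered text at each position and counts down a remaining-replacements budget.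
import Mathlib
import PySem

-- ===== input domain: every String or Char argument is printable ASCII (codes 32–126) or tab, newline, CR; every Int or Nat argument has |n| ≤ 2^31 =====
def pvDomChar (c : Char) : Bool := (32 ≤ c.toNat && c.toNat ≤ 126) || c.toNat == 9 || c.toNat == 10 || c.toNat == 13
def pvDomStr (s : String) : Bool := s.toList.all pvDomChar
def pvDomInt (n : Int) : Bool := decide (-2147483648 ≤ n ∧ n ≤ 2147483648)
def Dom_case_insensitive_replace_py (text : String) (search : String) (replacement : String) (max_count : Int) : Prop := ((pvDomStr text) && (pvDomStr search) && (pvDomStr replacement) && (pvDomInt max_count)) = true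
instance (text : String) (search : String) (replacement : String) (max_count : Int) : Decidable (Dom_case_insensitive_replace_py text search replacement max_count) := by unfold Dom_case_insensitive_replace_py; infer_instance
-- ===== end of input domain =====

-- B replaces A's repeated `str.find` + slicing loop by a single left-to-right character
-- scan that compares a lowered window of length len(search) at each position (objective:
-- alternative; same asymptotic cost).

-- ===== PORT A =====

-- A's while-loop: find the next occurrence of the lowered pattern in the lowered text
-- from `pos`, emit the slice before it and the replacement, advance past the match.
-- `sl.length = search.length` (lowering is per-character), so advancing by `sl.length`
-- is Python's `pos = idx + len(search)`.  `fuel` is a totality guard only: each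
-- iteration advances `pos` by at least 1 (the caller returns early when search is
-- empty), so `fuel = len(text) + 1` is never exhausted (proved in ciLoop_main).
def ciLoopA (t tl sl repl : List Char) (mc : Int) (fuel : Nat) (pos : Nat) (count : Int) : List Char :=
  match fuel with
  | 0 => []
  | fuel + 1 =>
    let idx := PySem.Chars.findFrom tl sl (pos : Int) none
    if idx = -1 then
      PySem.List.slice t (some (pos : Int)) none          -- result.append(text[pos:]); break
    else
      PySem.List.slice t (some (pos : Int)) (some idx) ++ repl ++   -- text[pos:idx], replacement
        (if 0 < mc ∧ mc ≤ count + 1 then                  -- pos = idx + len(search); count += 1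
           PySem.List.slice t (some ((idx.toNat + sl.length : Nat) : Int)) none
         else ciLoopA t tl sl repl mc fuel (idx.toNat + sl.length) (count + 1))

def case_insensitive_replace_py (text : String) (search : String) (replacement : String) (max_count : Int) : String :=
  if search.toList = [] then text
  else
    String.mk (ciLoopA text.toList (PySem.Chars.lower text.toList)
      (PySem.Chars.lower search.toList) replacement.toList max_count
      (text.toList.length + 1) 0 0)

-- ===== PORT B =====

-- B's while-loop: at each position test `text_lower.startswith(search_lower, i)`; on a
-- hit emit the replacement and jump by len(search), else copy one character.  On the
-- list side, `text_lower` from index i is `PySem.Chars.lower rest` (lowering is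
-- per-character, so it commutes with drop), and the jump by `len(search)` is `sl.length`.  `remaining` counts replacements still allowed (-1 = unlimited).
-- `fuel` is a totality guard only: each iteration consumes at least one character (the
-- caller returns early when search is empty), so `fuel = len(text)` is never exhausted.
def ciLoopB (sl repl : List Char) (fuel : Nat) (rest : List Char) (remaining : Int) : List Char :=
  match fuel, rest with
  | _, [] => []
  | 0, _ :: _ => []
  | fuel + 1, c :: cs =>
    if remaining ≠ 0 ∧ PySem.Chars.startswith (PySem.Chars.lower (c :: cs)) sl = true then
      repl ++ ciLoopB sl repl fuel ((c :: cs).drop sl.length)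
        (if 0 < remaining then remaining - 1 else remaining)
    else
      c :: ciLoopB sl repl fuel cs remaining

def case_insensitive_replace_py_alt (text : String) (search : String) (replacement : String) (max_count : Int) : String :=
  if search.toList = [] then text
  else
    String.mk (ciLoopB (PySem.Chars.lower search.toList) replacement.toList
      text.toList.length text.toList (if 0 < max_count then max_count else -1))

-- ===== PRECONDITION & SPEC =====
def Spec_case_insensitive_replace_py (text : String) (search : String) (replacement : String) (max_count : Int) (out : String) : Prop := out = case_insensitive_replace_py_alt text search replacement max_count
instance (text : String) (search : String) (replacement : String) (max_count : Int) (out : String) : Decidable (Spec_case_insensitive_replace_py text search replacement max_count out) := by unfold Spec_case_insensitive_replace_py; infer_instance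

-- ===== CLAIM (what is proved, stated in full; the proofs are below) =====
def Claim_equal_case_insensitive_replace_py : Prop := ∀ (text : String) (search : String) (replacement : String) (max_count : Int), Dom_case_insensitive_replace_py text search replacement max_count → Spec_case_insensitive_replace_py text search replacement max_count (case_insensitive_replace_py text search replacement max_count)

-- ===== LEMMAS AND PROOFS =====

-- Facts about A's `find(sub, pos)` when it succeeds: the start was in range, the hit is
-- at or after the start, the pattern is a prefix of the tail there, and it is first.
theorem ciFindFrom_facts (tl sl : List Char) (pos : Nat)
    (h : PySem.Chars.findFrom tl sl (pos : Int) none ≠ -1) :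
    pos ≤ tl.length ∧ (pos : Int) ≤ PySem.Chars.findFrom tl sl (pos : Int) none ∧
      sl <+: tl.drop (PySem.Chars.findFrom tl sl (pos : Int) none).toNat ∧
      ∀ i : Nat, pos ≤ i → i < (PySem.Chars.findFrom tl sl (pos : Int) none).toNat →
        ¬ sl <+: tl.drop i := by
  have hlen : pos ≤ tl.length := by
    by_contra hlt
    apply h
    simp only [PySem.Chars.findFrom]
    rw [if_neg (show ¬((pos : Int) < 0) by omega),
      if_pos (show ((tl.length : Int) : Int) < (pos : Int) by omega)]
  obtain ⟨h1, h2, h3⟩ := PySem.Chars.findFrom_natCast_spec tl sl pos hlen h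
  exact ⟨hlen, h1, h2, fun i hi1 hi2 => h3 i hi1 hi2⟩

-- If the pattern does not occur in the lowered rest, B copies rest unchanged.
theorem ciLoopB_no_match (sl repl : List Char) :
    ∀ (fuel : Nat) (rest : List Char) (r : Int), rest.length ≤ fuel →
    ¬ sl <:+: PySem.Chars.lower rest → ciLoopB sl repl fuel rest r = rest := by
  intro fuel
  induction fuel with
  | zero =>
    intro rest r hf _
    match rest with
    | [] => rw [ciLoopB]
    | c :: cs => simp at hf
  | succ fuel ih =>
    intro rest r hf h
    match rest with
    | [] => rw [ciLoopB]
    | c :: cs =>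
      rw [ciLoopB]
      have hm : ¬ PySem.Chars.startswith (PySem.Chars.lower (c :: cs)) sl = true := by
        intro hc
        exact h ((PySem.Chars.startswith_iff _ _).mp hc).isInfix
      rw [if_neg (by tauto)]
      have hcs : ¬ sl <:+: PySem.Chars.lower cs := by
        intro hc
        apply h
        have hcons : PySem.Chars.lower (c :: cs) =
            PySem.Chars.lowerChar c :: PySem.Chars.lower cs := by simp [PySem.Chars.lower]
        rw [hcons]
        exact List.infix_cons hc
      rw [ih cs r (by simpa using hf) hcs]

-- With remaining = 0, B copies everything unchanged.
theorem ciLoopB_zero (sl repl : List Char) :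
    ∀ (fuel : Nat) (rest : List Char), rest.length ≤ fuel →
    ciLoopB sl repl fuel rest 0 = rest := by
  intro fuel
  induction fuel with
  | zero =>
    intro rest hf
    match rest with
    | [] => rw [ciLoopB]
    | c :: cs => simp at hf
  | succ fuel ih =>
    intro rest hf
    match rest with
    | [] => rw [ciLoopB]
    | c :: cs => rw [ciLoopB, if_neg (by simp), ih cs (by simpa using hf)]

-- With budget left and a match at the head, B emits the replacement and jumps.
theorem ciLoopB_step (sl repl rest : List Char) (fuel : Nat) (r : Int) (hsl : sl ≠ [])
    (hr : r ≠ 0) (hm : sl <+: PySem.Chars.lower rest) :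
    ciLoopB sl repl (fuel + 1) rest r =
      repl ++ ciLoopB sl repl fuel (rest.drop sl.length)
        (if 0 < r then r - 1 else r) := by
  match rest with
  | [] =>
    exact absurd (by simpa [PySem.Chars.lower] using hm) hsl
  | c :: cs =>
    rw [ciLoopB, if_pos ⟨hr, (PySem.Chars.startswith_iff _ _).mpr hm⟩]

-- If the pattern occurs nowhere in the first k lowered positions, B copies k characters.
theorem ciLoopB_copy (sl repl : List Char) (r : Int) :
    ∀ (k fuel : Nat) (rest : List Char), k ≤ rest.length → rest.length ≤ fuel →
    (∀ j : Nat, j < k → ¬ sl <+: (PySem.Chars.lower rest).drop j) →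
    ciLoopB sl repl fuel rest r = rest.take k ++ ciLoopB sl repl (fuel - k) (rest.drop k) r := by
  intro k
  induction k with
  | zero => simp
  | succ k ih =>
    intro fuel rest hlen hf hno
    match fuel, rest with
    | fuel, [] => simp at hlen
    | 0, c :: cs => simp at hf
    | fuel + 1, c :: cs =>
      rw [ciLoopB]
      have hm : ¬ PySem.Chars.startswith (PySem.Chars.lower (c :: cs)) sl = true := by
        intro hc
        exact hno 0 (by omega) (by simpa using (PySem.Chars.startswith_iff _ _).mp hc)
      rw [if_neg (by tauto)]
      rw [ih fuel cs (by simpa using hlen) (by simpa using hf)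
        (fun j hj => by simpa [PySem.Chars.lower] using hno (j + 1) (by omega))]
      simp

-- Main loop correspondence: A's find-loop from position `pos` produces exactly B's scan
-- over the remaining suffix, with B's budget `remaining = mc - count` (or -1, unlimited).
theorem ciLoop_main (t sl repl : List Char) (mc : Int) (hsl : sl ≠ []) :
    ∀ (fuelA fuelB pos : Nat) (count : Int),
    t.length - pos < fuelA → t.length - pos ≤ fuelB → pos ≤ t.length →
    (0 < mc → count < mc) →
    ciLoopA t (PySem.Chars.lower t) sl repl mc fuelA pos count =
      ciLoopB sl repl fuelB (t.drop pos) (if 0 < mc then mc - count else -1) := by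
  intro fuelA
  induction fuelA with
  | zero => intro fuelB pos count hA _ _ _; omega
  | succ fuelA ih =>
    intro fuelB pos count hA hB hpos hcount
    have hslen : 1 ≤ sl.length := List.length_pos_iff.mpr hsl
    have hlenl : (PySem.Chars.lower t).length = t.length := by
      simp [PySem.Chars.lower]
    rw [ciLoopA]
    by_cases hidx : PySem.Chars.findFrom (PySem.Chars.lower t) sl (pos : Int) none = -1
    · rw [if_pos hidx, PySem.List.slice_from t (Int.natCast_nonneg _), Int.toNat_natCast]
      have hno : ¬ sl <:+: (PySem.Chars.lower t).drop pos := by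
        rw [← PySem.Chars.findFrom_natCast_eq_neg_one_iff _ _ pos (by omega)]
        exact hidx
      rw [ciLoopB_no_match _ _ _ _ _ (by simp; omega) (by
        simpa [PySem.Chars.lower, List.map_drop] using hno)]
    · rw [if_neg hidx]
      obtain ⟨-, hge, hpre, hmin⟩ := ciFindFrom_facts (PySem.Chars.lower t) sl pos hidx
      set idx := PySem.Chars.findFrom (PySem.Chars.lower t) sl (pos : Int) none with hidxdef
      have h0 : (0 : Int) ≤ idx := le_trans (Int.natCast_nonneg _) hge
      have hcast : idx = ((idx.toNat : Nat) : Int) := (Int.toNat_of_nonneg h0).symm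
      set i := idx.toNat with hidef
      have hpi : pos ≤ i := by omega
      have hiend : i + sl.length ≤ t.length := by
        have := hpre.length_le
        simp [List.length_drop, hlenl] at this
        omega
      -- the slice before the match
      rw [hcast, PySem.List.slice_natCast]
      -- B's side: copy i - pos characters, then one match step
      have hr0 : (if 0 < mc then mc - count else -1) ≠ 0 := by
        split_ifs with h
        · have := hcount h; omega
        · omega
      rw [ciLoopB_copy sl repl _ (i - pos) fuelB (t.drop pos) (by simp; omega) (by simp; omega)
        (fun j hj => by
          have := hmin (pos + j) (by omega) (by omega)
          simpa [PySem.Chars.lower, List.map_drop, Nat.add_comm pos j] using this)]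
      have hps : pos + (i - pos) = i := by omega
      rw [List.drop_drop, hps]
      -- unfold one matching step of B at position i
      obtain ⟨fb, hfb⟩ : ∃ fb, fuelB - (i - pos) = fb + 1 :=
        ⟨fuelB - (i - pos) - 1, by omega⟩
      rw [hfb, ciLoopB_step sl repl (t.drop i) fb _ hsl hr0
        (by simpa [PySem.Chars.lower, List.map_drop] using hpre)]
      rw [List.drop_drop, List.append_assoc]
      congr 1
      congr 1
      -- align the two tails
      by_cases hstop : 0 < mc ∧ mc ≤ count + 1
      · rw [if_pos hstop]
        have hmceq : mc = count + 1 := by have := hcount hstop.1; omega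
        have hz : (if 0 < (if 0 < mc then mc - count else -1) then
            (if 0 < mc then mc - count else -1) - 1 else (if 0 < mc then mc - count else -1)) = 0 := by
          rw [if_pos hstop.1, if_pos (by omega)]; omega
        rw [hz, ciLoopB_zero sl repl fb _ (by simp; omega),
          PySem.List.slice_from t (Int.natCast_nonneg _), Int.toNat_natCast]
      · rw [if_neg hstop]
        have hc1 : 0 < mc → count + 1 < mc := by
          intro h
          rcases not_and_or.mp hstop with h' | h'
          · exact absurd h h'
          · omega
        have hrec := ih fb (i + sl.length) (count + 1) (by omega) (by simp; omega)
          (by omega) hc1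
        rw [hrec]
        congr 1
        by_cases hmcpos : 0 < mc
        · have hlt := hcount hmcpos
          simp only [if_pos hmcpos]
          rw [if_pos (show (0 : Int) < mc - count by omega)]
          omega
        · simp only [if_neg hmcpos]
          rw [if_neg (show ¬((0 : Int) < -1) by omega)]

-- ===== VERDICT (by name: the statement is the Claim_ definition above) =====
theorem case_insensitive_replace_py_spec : Claim_equal_case_insensitive_replace_py := by
  intro text search replacement max_count _
  unfold Spec_case_insensitive_replace_py
  unfold case_insensitive_replace_py case_insensitive_replace_py_alt
  by_cases hs : search.toList = []
  · rw [if_pos hs, if_pos hs]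
  · rw [if_neg hs, if_neg hs]
    have hsl : PySem.Chars.lower search.toList ≠ [] := by
      simp [PySem.Chars.lower, hs]
    rw [ciLoop_main text.toList _ replacement.toList max_count hsl
      (text.toList.length + 1) text.toList.length 0 0 (by omega) (by omega) (by omega)
      (by intro h; exact h)]
    simp
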